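-- pv_equiv track=rewrite | github.com/OCoderO/Elements-of-Software-Design---UT-Austin | Recursion Exercises - A9/Boxes.py | largest_nesting_subsets
-- ===== SOURCE A (Python) =====
-- def largest_nesting_subsets(all_nesting_boxes):
--     #Below are 3 different types of counting variables
--     largest_size = 0
--     instances_of_largest_size = 0
--     count = 1
--
--     #Use nested for loops because all_nesting_boxes is a 3D list
--     for subset in range(len(all_nesting_boxes)):
--         for box in range(len(all_nesting_boxes[subset]) - 1):
--             #First determine whether the subset is nesting (does_fit()
--             if does_fit(all_nesting_boxes[subset][box],
--                         all_nesting_boxes[subset][box + 1]):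
--                 count += 1 #Counts up the number of boxes in the subset that fit
--
--             #Checks that all the boxes in the subsets fit into one another
--             if count == len(all_nesting_boxes[subset]):
--               if largest_size < len(all_nesting_boxes[subset]): #Checks that largest size will only increase
--                 largest_size = len(all_nesting_boxes[subset])
--
--                 instances_of_largest_size = 0 #Clears instances_of_largest_size
--
--               if largest_size == len(all_nesting_boxes[subset]): #Check to see how many instances of subsets with the number of nesting boxes
--                 instances_of_largest_size += 1
--
--         count = 1 #Clears count
--
--     return largest_size,instances_of_largest_size
--
-- def does_fit(box1, box2):
--     return (box1[0] < box2[0] and box1[1] < box2[1] and box1[2] < box2[2])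
-- ===== SOURCE B (Python) =====
-- def largest_nesting_subsets(all_nesting_boxes):
--     tally = {}
--     for subset in all_nesting_boxes:
--         if is_nesting_chain(subset):
--             n = len(subset)
--             tally[n] = tally.get(n, 0) + 1
--     if not tally:
--         return 0, 0
--     m = max(tally)
--     return m, tally[m]
--
-- def is_nesting_chain(subset):
--     # a chain needs at least two boxes, each with all three dimensions present
--     if len(subset) < 2 or any(len(box) < 3 for box in subset):
--         return False
--     # check each coordinate column is strictly increasing along the subset
--     for j in range(3):
--         col = [box[j] for box in subset]
--         if any(a >= b for a, b in zip(col, col[1:])):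
--             return False
--     return True
-- ===== Notes on version B (the rewrite author's own statement) =====
-- stated objective: alternative
-- what changed: Replaces A's row-wise does_fit pair test with a transposed column-wise check (each of the three coordinate columns strictly increasing) and replaces A's online max/instances tracking with a dict tally of qualifying lengths, answering with the max key and its tally.
import Mathlib
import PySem

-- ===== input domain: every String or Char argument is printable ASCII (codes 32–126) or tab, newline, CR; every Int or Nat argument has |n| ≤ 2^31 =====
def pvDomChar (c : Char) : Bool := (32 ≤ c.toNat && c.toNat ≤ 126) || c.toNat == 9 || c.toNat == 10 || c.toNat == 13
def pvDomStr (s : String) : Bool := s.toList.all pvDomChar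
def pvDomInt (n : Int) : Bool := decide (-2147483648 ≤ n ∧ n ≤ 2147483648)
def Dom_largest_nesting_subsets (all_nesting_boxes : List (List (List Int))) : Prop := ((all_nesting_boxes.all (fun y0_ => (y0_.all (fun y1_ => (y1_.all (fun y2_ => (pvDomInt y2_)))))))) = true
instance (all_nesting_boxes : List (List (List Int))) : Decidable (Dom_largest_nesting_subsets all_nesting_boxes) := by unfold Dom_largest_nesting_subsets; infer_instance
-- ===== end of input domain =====

-- B replaces A's row-wise does_fit pair scan and online max/instances tracking with a transposed
-- column-wise strictly-increasing check per coordinate and a dict tally of qualifying subset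
-- lengths, answering with the max key and its tally (objective: alternative).

-- ===== PORT A =====
-- does_fit(box1, box2)
def pvFit (b1 b2 : List Int) : Bool :=
  decide (PySem.List.pyGetD b1 (0 : Int) 0 < PySem.List.pyGetD b2 (0 : Int) 0) &&
  decide (PySem.List.pyGetD b1 (1 : Int) 0 < PySem.List.pyGetD b2 (1 : Int) 0) &&
  decide (PySem.List.pyGetD b1 (2 : Int) 0 < PySem.List.pyGetD b2 (2 : Int) 0)

-- does_fit(subset[i], subset[i+1])
def pvFitAt (s : List (List Int)) (i : Nat) : Bool :=
  pvFit (PySem.List.pyGetD s (i : Int) []) (PySem.List.pyGetD s ((i + 1 : Nat) : Int) [])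

-- one iteration of A's inner 'for box in range(len(subset)-1)' loop; state = (largest_size, instances, count)
def pvStepA (s : List (List Int)) (st : Int × Int × Int) (i : Nat) : Int × Int × Int :=
  let cnt := if pvFitAt s i then st.2.2 + 1 else st.2.2
  if cnt = (s.length : Int) then
    let ls := if st.1 < (s.length : Int) then (s.length : Int) else st.1
    let inst := if st.1 < (s.length : Int) then 0 else st.2.1
    (ls, if ls = (s.length : Int) then inst + 1 else inst, cnt)
  else (st.1, st.2.1, cnt)

-- one iteration of A's outer loop: run the inner loop with count reset to 1
def pvSubA (st : Int × Int) (s : List (List Int)) : Int × Int :=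
  let r := (List.range (s.length - 1)).foldl (pvStepA s) (st.1, st.2, 1)
  (r.1, r.2.1)

def largest_nesting_subsets (all_nesting_boxes : List (List (List Int))) : Int × Int :=
  all_nesting_boxes.foldl pvSubA (0, 0)

-- ===== PORT B =====
-- is_nesting_chain(subset): early-exit guards, then each coordinate column strictly increasing
def pvChainB (s : List (List Int)) : Bool :=
  if decide (s.length < 2) || s.any (fun b => decide (b.length < 3)) then false
  else (List.range 3).all (fun j =>
    let col := s.map (fun b => PySem.List.pyGetD b (j : Int) 0)
    !((col.zip col.tail).any (fun p => decide (p.1 ≥ p.2))))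

def largest_nesting_subsets_alt (all_nesting_boxes : List (List (List Int))) : Int × Int :=
  let tally := all_nesting_boxes.foldl (fun d s =>
    if pvChainB s then d.insert (s.length : Int) (d.getD (s.length : Int) 0 + 1) else d)
    (PySem.Dict.empty : PySem.Dict Int Int)
  match PySem.List.max? tally.keys (fun x => x) with
  | none => (0, 0)
  | some m => (m, tally.getD m 0)

-- ===== PRECONDITION & SPEC =====
-- exact short-circuit domain of one does_fit(b1, b2) call: each index is demanded only when the
-- previous comparison came out True, exactly as Python's 'and' evaluates
def pvFitOk (b1 b2 : List Int) : Bool :=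
  decide (1 ≤ b1.length) && decide (1 ≤ b2.length) &&
  (!(decide (PySem.List.pyGetD b1 (0 : Int) 0 < PySem.List.pyGetD b2 (0 : Int) 0)) ||
    (decide (2 ≤ b1.length) && decide (2 ≤ b2.length) &&
      (!(decide (PySem.List.pyGetD b1 (1 : Int) 0 < PySem.List.pyGetD b2 (1 : Int) 0)) ||
        (decide (3 ≤ b1.length) && decide (3 ≤ b2.length)))))

-- Pre_ = exactly the inputs where A returns (no IndexError from any does_fit call it makes)
def Pre_largest_nesting_subsets (all_nesting_boxes : List (List (List Int))) : Prop :=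
  (all_nesting_boxes.all (fun s => (List.range (s.length - 1)).all
    (fun i => pvFitOk (PySem.List.pyGetD s (i : Int) []) (PySem.List.pyGetD s ((i + 1 : Nat) : Int) [])))) = true
instance (all_nesting_boxes : List (List (List Int))) : Decidable (Pre_largest_nesting_subsets all_nesting_boxes) := by unfold Pre_largest_nesting_subsets; infer_instance

def pvWitness_largest_nesting_subsets : List (List (List Int)) := [[[1, 2, 3], [4, 5, 6]]]

def Spec_largest_nesting_subsets (all_nesting_boxes : List (List (List Int))) (out : Int × Int) : Prop := out = largest_nesting_subsets_alt all_nesting_boxes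
instance (all_nesting_boxes : List (List (List Int))) (out : Int × Int) : Decidable (Spec_largest_nesting_subsets all_nesting_boxes out) := by unfold Spec_largest_nesting_subsets; infer_instance

-- ===== CLAIM (what is proved, stated in full; the proofs are below) =====
def Claim_equal_largest_nesting_subsets : Prop := ∀ (all_nesting_boxes : List (List (List Int))), Dom_largest_nesting_subsets all_nesting_boxes → Pre_largest_nesting_subsets all_nesting_boxes → Spec_largest_nesting_subsets all_nesting_boxes (largest_nesting_subsets all_nesting_boxes)

-- ===== LEMMAS AND PROOFS =====

-- proof-side characterisation of A's per-subset test: all consecutive pairs fit and len >= 2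
def pvChain (s : List (List Int)) : Bool :=
  decide (2 ≤ s.length) && (List.range (s.length - 1)).all (fun i => pvFitAt s i)

-- the (largest_size, instances) update A performs when a subset of length n qualifies
def pvUpd (st : Int × Int) (n : Int) : Int × Int :=
  let ls := if st.1 < n then n else st.1
  let inst := if st.1 < n then 0 else st.2
  (ls, if ls = n then inst + 1 else inst)

-- number of fitting consecutive pairs among the first k
def pvTC (s : List (List Int)) (k : Nat) : Nat := (List.range k).countP (fun i => pvFitAt s i)

lemma pvTC_le (s : List (List Int)) (k : Nat) : pvTC s k ≤ k := by
  simpa [pvTC] using List.countP_le_length (l := List.range k) (p := fun i => pvFitAt s i)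

lemma pvTC_succ (s : List (List Int)) (k : Nat) :
    pvTC s (k + 1) = pvTC s k + (if pvFitAt s k then 1 else 0) := by
  simp [pvTC, List.range_succ, List.countP_append]

lemma stepA_char (s : List (List Int)) (ls inst cnt : Int) (i : Nat) :
    pvStepA s (ls, inst, cnt) i =
      if (if pvFitAt s i then cnt + 1 else cnt) = (s.length : Int)
      then ((pvUpd (ls, inst) (s.length : Int)).1, (pvUpd (ls, inst) (s.length : Int)).2,
            if pvFitAt s i then cnt + 1 else cnt)
      else (ls, inst, if pvFitAt s i then cnt + 1 else cnt) := by
  unfold pvStepA pvUpd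
  by_cases hf : pvFitAt s i <;> split_ifs <;> simp_all

lemma inner_prefix (s : List (List Int)) (ls inst : Int) :
    ∀ k, k + 2 ≤ s.length →
      (List.range k).foldl (pvStepA s) (ls, inst, 1) = (ls, inst, 1 + (pvTC s k : Int)) := by
  intro k
  induction k with
  | zero => intro _; simp [pvTC]
  | succ k ih =>
    intro h
    have hlek : pvTC s k ≤ k := pvTC_le s k
    rw [List.range_succ, List.foldl_append, ih (by omega), List.foldl_cons, List.foldl_nil,
      stepA_char, pvTC_succ]
    by_cases hf : pvFitAt s k <;> simp only [hf, if_true, Bool.false_eq_true, if_false]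
    · rw [if_neg (by omega)]
      simp only [Prod.mk.injEq, true_and]
      push_cast; ring
    · rw [if_neg (by omega)]
      simp

lemma chain_iff (s : List (List Int)) (h2 : 2 ≤ s.length) :
    pvChain s = true ↔ pvTC s (s.length - 1) = s.length - 1 := by
  unfold pvChain pvTC
  constructor
  · intro h
    rw [Bool.and_eq_true] at h
    rw [List.countP_eq_length.mpr (List.all_eq_true.mp h.2), List.length_range]
  · intro h
    rw [Bool.and_eq_true]
    refine ⟨by simp [h2], ?_⟩
    rw [List.all_eq_true]
    exact List.countP_eq_length.mp (by rw [List.length_range]; exact h)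

lemma subA_eq (st : Int × Int) (s : List (List Int)) :
    pvSubA st s = if pvChain s then pvUpd st (s.length : Int) else st := by
  by_cases h2 : 2 ≤ s.length
  case neg =>
    have h1 : s.length - 1 = 0 := by omega
    have hc : pvChain s = false := by
      unfold pvChain; simp [h2]
    rw [hc]
    simp [pvSubA, h1]
  case pos =>
    have hch := chain_iff s h2
    have hsplit : s.length - 1 = (s.length - 2) + 1 := by omega
    have hle2 : pvTC s (s.length - 2) ≤ s.length - 2 := pvTC_le s _
    have hle1 : pvTC s (s.length - 1) ≤ s.length - 1 := pvTC_le s _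
    have hsucc := pvTC_succ s (s.length - 2)
    rw [← hsplit] at hsucc
    unfold pvSubA
    rw [hsplit, List.range_succ, List.foldl_append,
      inner_prefix s st.1 st.2 (s.length - 2) (by omega),
      List.foldl_cons, List.foldl_nil, stepA_char]
    by_cases hall : pvTC s (s.length - 1) = s.length - 1
    · have hc : pvChain s = true := hch.mpr hall
      have hfit : pvFitAt s (s.length - 2) = true := by
        by_contra hnf
        rw [Bool.not_eq_true] at hnf
        rw [hnf] at hsucc
        simp at hsucc
        omega
      have hcnt : (1 : Int) + (pvTC s (s.length - 2) : Int) + 1 = (s.length : Int) := by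
        rw [hfit] at hsucc
        simp at hsucc
        omega
      rw [hc, if_pos rfl]
      simp only [hfit, if_true]
      rw [if_pos hcnt]
    · have hc : pvChain s = false := Bool.eq_false_iff.mpr (fun h => hall (hch.mp h))
      have hlt : pvTC s (s.length - 1) < s.length - 1 := by omega
      rw [hc]
      simp only [Bool.false_eq_true, if_false]
      by_cases hf : pvFitAt s (s.length - 2) <;>
        simp only [hf, if_true, Bool.false_eq_true, if_false] at hsucc ⊢
      · rw [if_neg (by omega)]
      · rw [if_neg (by omega)]

lemma foldl_pvUpd (l : List Int) :
    ∀ ls inst : Int,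
      l.foldl pvUpd (ls, inst) =
        (l.foldl max ls,
          (if ls = l.foldl max ls then inst else 0) + (List.count (l.foldl max ls) l : Int)) := by
  induction l with
  | nil => intro ls inst; simp
  | cons a l ih =>
    intro ls inst
    have hM : (a :: l).foldl max ls = l.foldl max (max ls a) := by simp
    rw [List.foldl_cons, hM]
    by_cases hlt : ls < a
    · have hmax : max ls a = a := by omega
      have hupd : pvUpd (ls, inst) a = (a, 1) := by simp [pvUpd, hlt]
      rw [hupd, ih a 1, hmax]
      have hMa : a ≤ l.foldl max a := (PySem.List.le_foldl_max l a).1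
      have hlsne : ¬ ls = l.foldl max a := by omega
      rw [List.count_cons]
      simp only [Prod.mk.injEq, true_and]
      by_cases haF : a = l.foldl max a
      · rw [if_pos haF, if_neg hlsne, if_pos (beq_iff_eq.mpr haF)]; push_cast; ring
      · rw [if_neg haF, if_neg hlsne, if_neg (by simpa using haF)]; push_cast; ring
    · have hmax : max ls a = ls := by omega
      rw [hmax]
      have hMa : ls ≤ l.foldl max ls := (PySem.List.le_foldl_max l ls).1
      by_cases heq : ls = a
      · have hupd : pvUpd (ls, inst) a = (ls, inst + 1) := by simp [pvUpd, heq]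
        rw [hupd, ih ls (inst + 1), List.count_cons, ← heq]
        simp only [Prod.mk.injEq, true_and]
        by_cases hM2 : ls = l.foldl max ls
        · rw [if_pos hM2, if_pos hM2, if_pos (beq_iff_eq.mpr hM2)]; push_cast; ring
        · rw [if_neg hM2, if_neg hM2, if_neg (by simpa using hM2)]; push_cast; ring
      · have hane : a < ls := by omega
        have hupd : pvUpd (ls, inst) a = (ls, inst) := by
          simp [pvUpd, hlt, heq]
        rw [hupd, ih ls inst, List.count_cons]
        have hne : ¬ (a = l.foldl max ls) := by omega
        simp [hne]

lemma lens_ge_two (xs : List (List (List Int))) :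
    ∀ x ∈ (xs.filter pvChain).map (fun s => (s.length : Int)), 2 ≤ x := by
  intro x hx
  obtain ⟨s, hs, rfl⟩ := List.mem_map.mp hx
  have hch := (List.mem_filter.mp hs).2
  have h2 : 2 ≤ s.length := by
    by_contra h
    unfold pvChain at hch
    simp [h] at hch
  exact_mod_cast h2

lemma pyGetD_idx (s : List (List Int)) (i : Nat) (hi : i < s.length) :
    PySem.List.pyGetD s (i : Int) [] = s[i] := by
  rw [PySem.List.pyGetD_natCast]
  exact List.getD_eq_getElem s [] hi

lemma colOK_iff (l : List Int) :
    ((!((l.zip l.tail).any (fun p => decide (p.1 ≥ p.2)))) = true) ↔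
      ∀ (i : Nat) (h : i + 1 < l.length), l[i]'(Nat.lt_of_succ_lt h) < l[i + 1]'h := by
  rw [Bool.not_eq_true', List.any_eq_false]
  constructor
  · intro h i hi
    have hlen : i < (l.zip l.tail).length := by
      simp [List.length_zip, List.length_tail]; omega
    have hmem := h _ (List.getElem_mem hlen)
    rw [List.getElem_zip] at hmem
    rw [List.getElem_tail] at hmem
    simpa using hmem
  · intro h p hp
    obtain ⟨i, hlen, hpe⟩ := List.mem_iff_getElem.mp hp
    subst hpe
    rw [List.getElem_zip]
    have hi : i + 1 < l.length := by
      simp [List.length_zip, List.length_tail] at hlen; omega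
    rw [List.getElem_tail]
    simpa using h i hi

-- under the per-subset precondition, B's chain test agrees with A's
lemma chainB_eq_chain (s : List (List Int))
    (hpre : (List.range (s.length - 1)).all
      (fun i => pvFitOk (PySem.List.pyGetD s (i : Int) [])
        (PySem.List.pyGetD s ((i + 1 : Nat) : Int) [])) = true) :
    pvChainB s = pvChain s := by
  by_cases h2 : 2 ≤ s.length
  case neg =>
    have hc1 : decide (s.length < 2) = true := by simp; omega
    unfold pvChainB pvChain
    rw [hc1]
    simp [h2]
  case pos =>
    rw [List.all_eq_true] at hpre
    by_cases hshort : s.any (fun b => decide (b.length < 3)) = true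
    · have hcB : pvChainB s = false := by
        unfold pvChainB
        rw [hshort, if_pos (by simp)]
      rw [hcB]
      cases hcA : pvChain s
      · rfl
      · exfalso
        unfold pvChain at hcA
        rw [Bool.and_eq_true, List.all_eq_true] at hcA
        have hall := hcA.2
        have hpair : ∀ (i : Nat) (hi : i + 1 < s.length),
            3 ≤ (s[i]'(Nat.lt_of_succ_lt hi)).length ∧ 3 ≤ (s[i + 1]'hi).length := by
          intro i hi
          have hmem : i ∈ List.range (s.length - 1) := by
            rw [List.mem_range]; omega
          have hfo := hpre i hmem
          have hfa := hall i hmem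
          unfold pvFitAt pvFit at hfa
          unfold pvFitOk at hfo
          rw [pyGetD_idx s i (by omega), pyGetD_idx s (i + 1) hi] at hfo hfa
          simp only [Bool.and_eq_true, Bool.or_eq_true, Bool.not_eq_eq_eq_not, Bool.not_true,
            decide_eq_true_eq, decide_eq_false_iff_not, not_lt] at hfa hfo
          obtain ⟨⟨c0, c1⟩, c2⟩ := hfa
          rcases hfo.2 with h | ⟨⟨g2a, g2b⟩, h⟩
          · omega
          · rcases h with h | ⟨g3a, g3b⟩
            · omega
            · exact ⟨g3a, g3b⟩
        obtain ⟨b, hb, hblt⟩ := List.any_eq_true.mp hshort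
        obtain ⟨k, hk, hbk⟩ := List.mem_iff_getElem.mp hb
        simp only [decide_eq_true_eq] at hblt
        rcases Nat.lt_or_ge (k + 1) s.length with h | h
        · have h3 := (hpair k h).1
          rw [hbk] at h3
          omega
        · have hk1 : (k - 1) + 1 < s.length := by omega
          have h3 := (hpair (k - 1) hk1).2
          have hkk : k - 1 + 1 = k := by omega
          simp only [hkk] at h3
          rw [hbk] at h3
          omega
    · rw [Bool.not_eq_true] at hshort
      have hc1 : decide (s.length < 2) = false := by simp; omega
      have hcB : pvChainB s = (List.range 3).all (fun j =>
          let col := s.map (fun b => PySem.List.pyGetD b (j : Int) 0)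
          !((col.zip col.tail).any (fun p => decide (p.1 ≥ p.2)))) := by
        unfold pvChainB
        rw [hc1, hshort, if_neg (by simp)]
      rw [hcB, Bool.eq_iff_iff]
      have hcol : ∀ (j : Nat),
          ((!(((s.map (fun b => PySem.List.pyGetD b (j : Int) 0)).zip
              (s.map (fun b => PySem.List.pyGetD b (j : Int) 0)).tail).any
              (fun p => decide (p.1 ≥ p.2)))) = true) ↔
          ∀ (i : Nat) (hi : i + 1 < s.length),
            PySem.List.pyGetD (s[i]'(Nat.lt_of_succ_lt hi)) (j : Int) 0 <
              PySem.List.pyGetD (s[i + 1]'hi) (j : Int) 0 := by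
        intro j
        rw [colOK_iff]
        constructor <;> intro h i hi
        · have hi' : i + 1 < (s.map (fun b => PySem.List.pyGetD b (j : Int) 0)).length := by
            simpa using hi
          have := h i hi'
          simpa [List.getElem_map] using this
        · simp only [List.length_map] at hi
          simpa [List.getElem_map] using h i hi
      have hfa : ∀ (i : Nat) (hi : i + 1 < s.length),
          (pvFitAt s i = true) ↔
          (PySem.List.pyGetD (s[i]'(Nat.lt_of_succ_lt hi)) (0 : Int) 0 <
              PySem.List.pyGetD (s[i + 1]'hi) (0 : Int) 0 ∧
            PySem.List.pyGetD (s[i]'(Nat.lt_of_succ_lt hi)) (1 : Int) 0 <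
              PySem.List.pyGetD (s[i + 1]'hi) (1 : Int) 0 ∧
            PySem.List.pyGetD (s[i]'(Nat.lt_of_succ_lt hi)) (2 : Int) 0 <
              PySem.List.pyGetD (s[i + 1]'hi) (2 : Int) 0) := by
        intro i hi
        unfold pvFitAt pvFit
        rw [pyGetD_idx s i (by omega), pyGetD_idx s (i + 1) hi]
        simp [and_assoc]
      constructor
      · intro hB
        unfold pvChain
        rw [Bool.and_eq_true, List.all_eq_true]
        refine ⟨by simp [h2], ?_⟩
        intro i hmem
        rw [List.mem_range] at hmem
        have hi : i + 1 < s.length := by omega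
        rw [hfa i hi]
        rw [List.all_eq_true] at hB
        have h0 := (hcol 0).mp (hB 0 (by simp)) i hi
        have h1 := (hcol 1).mp (hB 1 (by simp)) i hi
        have h2' := (hcol 2).mp (hB 2 (by simp)) i hi
        push_cast at h0 h1 h2'
        exact ⟨h0, h1, h2'⟩
      · intro hA
        unfold pvChain at hA
        rw [Bool.and_eq_true, List.all_eq_true] at hA
        rw [List.all_eq_true]
        intro j hj
        rw [List.mem_range] at hj
        have hj' : j = 0 ∨ j = 1 ∨ j = 2 := by omega
        have key : ∀ (i : Nat) (hi : i + 1 < s.length),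
            PySem.List.pyGetD (s[i]'(Nat.lt_of_succ_lt hi)) (0 : Int) 0 <
                PySem.List.pyGetD (s[i + 1]'hi) (0 : Int) 0 ∧
              PySem.List.pyGetD (s[i]'(Nat.lt_of_succ_lt hi)) (1 : Int) 0 <
                PySem.List.pyGetD (s[i + 1]'hi) (1 : Int) 0 ∧
              PySem.List.pyGetD (s[i]'(Nat.lt_of_succ_lt hi)) (2 : Int) 0 <
                PySem.List.pyGetD (s[i + 1]'hi) (2 : Int) 0 := by
          intro i hi
          exact (hfa i hi).mp (hA.2 i (by rw [List.mem_range]; omega))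
        rcases hj' with rfl | rfl | rfl
        · rw [hcol 0]; intro i hi; push_cast; exact (key i hi).1
        · rw [hcol 1]; intro i hi; push_cast; exact (key i hi).2.1
        · rw [hcol 2]; intro i hi; push_cast; exact (key i hi).2.2

-- max over a Python set of ints = max over the underlying list
lemma max?_ofList (l : List Int) :
    PySem.List.max? (PySem.Set.ofList l) (fun x => x) = PySem.List.max? l (fun x => x) := by
  rcases hl : PySem.List.max? l (fun x => x) with _ | m
  · rw [PySem.List.max?_eq_none_iff] at hl
    subst hl
    rfl
  · have hm : m ∈ l := PySem.List.max?_mem hl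
    have hmax := PySem.List.max?_isMax hl
    rcases hd : PySem.List.max? (PySem.Set.ofList l) (fun x => x) with _ | m'
    · rw [PySem.List.max?_eq_none_iff] at hd
      exact absurd (hd ▸ (PySem.Set.mem_ofList l m).mpr hm) (List.not_mem_nil)
    · have hm' : m' ∈ l := (PySem.Set.mem_ofList l m').mp (PySem.List.max?_mem hd)
      have h1 : m' ≤ m := hmax m' hm'
      have h2 : m ≤ m' := PySem.List.max?_isMax hd m ((PySem.Set.mem_ofList l m).mpr hm)
      rw [le_antisymm h1 h2]

-- ===== VERDICT (by name: the statement is the Claim_ definition above) =====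
theorem largest_nesting_subsets_spec : Claim_equal_largest_nesting_subsets := by
  intro xs _ hpre
  show largest_nesting_subsets xs = largest_nesting_subsets_alt xs
  have hfeq : ∀ s ∈ xs, pvChainB s = pvChain s := by
    intro s hs
    exact chainB_eq_chain s (List.all_eq_true.mp hpre s hs)
  have hfilter : xs.filter pvChainB = xs.filter pvChain := List.filter_congr hfeq
  -- A reduces to a fold of pvUpd over the qualifying lengths
  have hsub : pvSubA = fun st s => if pvChain s then pvUpd st (s.length : Int) else st :=
    funext fun st => funext fun s => subA_eq st s
  have hA : largest_nesting_subsets xs =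
      ((xs.filter pvChain).map (fun s => (s.length : Int))).foldl pvUpd (0, 0) := by
    unfold largest_nesting_subsets
    rw [hsub, PySem.List.foldl_if_eq_foldl_filter, List.foldl_map]
  -- B's tally is the counter of the same lengths
  have hB : largest_nesting_subsets_alt xs =
      (match PySem.List.max? (PySem.Dict.counter
          ((xs.filter pvChain).map (fun s => (s.length : Int)))).keys (fun x => x) with
        | none => (0, 0)
        | some m => (m, (PySem.Dict.counter
            ((xs.filter pvChain).map (fun s => (s.length : Int)))).getD m 0)) := by
    have hmap : (List.filter pvChain xs).foldl
        (fun (d : PySem.Dict Int Int) s => d.insert (s.length : Int) (d.getD (s.length : Int) 0 + 1))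
        PySem.Dict.empty =
        ((List.filter pvChain xs).map (fun s => (s.length : Int))).foldl
          (fun d x => d.insert x (d.getD x 0 + 1)) PySem.Dict.empty :=
      (List.foldl_map (f := fun s : List (List Int) => (s.length : Int))
        (g := fun (d : PySem.Dict Int Int) x => d.insert x (d.getD x 0 + 1))).symm
    unfold largest_nesting_subsets_alt
    rw [PySem.List.foldl_if_eq_foldl_filter, hfilter, hmap,
      PySem.Dict.foldl_insert_getD_add_one_eq_counter]
  rw [hA, hB]
  rw [PySem.Dict.keys_counter, max?_ofList]
  cases hl : (xs.filter pvChain).map (fun s => (s.length : Int)) with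
  | nil => rfl
  | cons a t =>
    have hge := lens_ge_two xs
    rw [hl] at hge
    have ha2 : 2 ≤ a := hge a (by simp)
    rw [PySem.List.max?_id_cons, foldl_pvUpd]
    have hMa : a ≤ t.foldl max a := (PySem.List.le_foldl_max t a).1
    have h0a : max 0 a = a := by omega
    have hM : (a :: t).foldl max 0 = t.foldl max a := by simp [h0a]
    rw [hM, if_neg (by omega)]
    simp [PySem.Dict.getD_counter]
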